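-- pv_equiv track=rewrite | github.com/chanwoo-lee-cw/TIL | Algorithm_problem_solving/Baek-joon/23805/23805.py | draw_snail
-- ===== SOURCE A (Python) =====
-- def draw_snail(n):
--     """
--     돌아간 ㄹ이 그려진 배열을 반환
--
--     Args:
--         n (int): 셀의 크기
--
--     Returns:
--         list: 돌아간 ㄹ이 그려진 배열
--     """
--     snail = [['@'] * (n * 5) for _ in range(n * 5)]
--     for k in range(4):
--         for i in range(n):
--             for j in range(n):
--                 snail[k * n + i][n * 3 + j] = ' '
--                 snail[(k + 1) * n + i][n + j] = ' '
--     return snail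
-- ===== SOURCE B (Python) =====
-- def draw_snail(n):
--     if n <= 0:
--         return []
--     size = 5 * n
--     templates = [
--         [' ' if (3 * n <= c < 4 * n and b < 4) or (n <= c < 2 * n and 1 <= b) else '@'
--          for c in range(size)]
--         for b in range(5)]
--     return [list(templates[r // n]) for r in range(size)]
-- ===== Notes on version B (the rewrite author's own statement) =====
-- stated objective: alternative
-- what changed: B decides each cell from a coordinate predicate evaluated once per horizontal band of rows (five row templates, one copied per row), instead of A's filling a 5n x 5n grid with '@' and then blanking two rectangles cell by cell with a triple nested loop of in-place assignments.
import Mathlib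
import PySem

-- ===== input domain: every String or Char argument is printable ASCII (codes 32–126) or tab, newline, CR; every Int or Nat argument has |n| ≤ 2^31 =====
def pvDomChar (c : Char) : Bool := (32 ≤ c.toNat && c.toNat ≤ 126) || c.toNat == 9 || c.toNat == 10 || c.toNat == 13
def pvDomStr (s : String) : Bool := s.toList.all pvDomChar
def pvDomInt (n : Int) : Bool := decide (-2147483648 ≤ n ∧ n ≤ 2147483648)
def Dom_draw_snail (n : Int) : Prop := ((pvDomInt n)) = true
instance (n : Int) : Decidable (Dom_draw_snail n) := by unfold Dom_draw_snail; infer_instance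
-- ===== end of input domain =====

-- B decides each cell from a coordinate predicate, computed once per horizontal band of rows and
-- copied per row, instead of A's fill-with-'@'-then-blank-two-rectangles in-place passes.

-- ===== PORT A =====
-- `snail[r][c] = ' '`: in A the indices are always nonnegative and in range whenever the loops run,
-- so `.toNat` + modify/set is exact here (Python would raise only out of range, which never happens).
def pvSetCell (g : List (List String)) (r c : Int) (v : String) : List (List String) :=
  g.modify r.toNat (fun row => row.set c.toNat v)

def draw_snail (n : Int) : List (List String) :=
  let snail := List.replicate (n * 5).toNat (List.replicate (n * 5).toNat "@")
  (PySem.List.pyRange 0 4 1).foldl (fun g k =>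
    (PySem.List.pyRange 0 n 1).foldl (fun g i =>
      (PySem.List.pyRange 0 n 1).foldl (fun g j =>
        pvSetCell (pvSetCell g (k * n + i) (n * 3 + j) " ") ((k + 1) * n + i) (n + j) " ") g) g)
    snail

-- ===== PORT B =====
def draw_snail_alt (n : Int) : List (List String) :=
  if n ≤ 0 then []
  else
    let templates := (PySem.List.pyRange 0 5 1).map (fun b =>
      (PySem.List.pyRange 0 (5 * n) 1).map (fun c =>
        if (3 * n ≤ c ∧ c < 4 * n ∧ b < 4) ∨ (n ≤ c ∧ c < 2 * n ∧ 1 ≤ b) then " " else "@"))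
    -- templates[r // n]: the index is always in range 0..4 here, so the default is never used
    (PySem.List.pyRange 0 (5 * n) 1).map (fun r =>
      PySem.List.pyGetD templates (PySem.Int.floordiv r n) [])

-- ===== PRECONDITION & SPEC =====
def Spec_draw_snail (n : Int) (out : List (List String)) : Prop := out = draw_snail_alt n
instance (n : Int) (out : List (List String)) : Decidable (Spec_draw_snail n out) := by unfold Spec_draw_snail; infer_instance

-- ===== CLAIM (what is proved, stated in full; the proofs are below) =====
def Claim_equal_draw_snail : Prop := ∀ (n : Int), Dom_draw_snail n → Spec_draw_snail n (draw_snail n)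

-- ===== LEMMAS AND PROOFS =====

-- cell lookup, the observable on which the in-place updates are analysed
def pvGetCell (g : List (List String)) (r c : Nat) : Option String :=
  (g[r]?).bind (fun row => row[c]?)

theorem pvGetCell_setCell (g : List (List String)) (a b : Int) (v : String) (r c : Nat) :
    pvGetCell (pvSetCell g a b v) r c =
      if r = a.toNat ∧ c = b.toNat then (pvGetCell g r c).map (fun _ => v) else pvGetCell g r c := by
  unfold pvGetCell pvSetCell
  rcases hg : g[r]? with _ | row
  · by_cases hr : a.toNat = r <;>
      simp [hg, hr]
  · have hrl : r < g.length := by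
      by_contra h
      simp [List.getElem?_eq_none (le_of_not_gt h)] at hg
    by_cases hr : r = a.toNat
    · subst hr
      simp only [List.getElem?_modify, hg, Option.map_eq_map, Option.map_some]
      by_cases hc : c = b.toNat
      · subst hc
        by_cases hcl : b.toNat < row.length
        · simp [List.getElem?_set, hcl, List.getElem?_eq_getElem hcl]
        · simp [List.getElem?_set, hcl, List.getElem?_eq_none (le_of_not_gt hcl)]
      · simp [hc, Ne.symm hc]
    · simp [hg, Ne.symm hr, hr]

-- a fold of pointwise blanking updates, characterised pointwise
theorem pv_foldl_update {α : Type} (f : List (List String) → α → List (List String))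
    (T : α → Bool) (v : String) (r c : Nat)
    (hstep : ∀ g x, pvGetCell (f g x) r c =
      if T x then (pvGetCell g r c).map (fun _ => v) else pvGetCell g r c) :
    ∀ (l : List α) (g : List (List String)),
      pvGetCell (l.foldl f g) r c =
        if l.any T then (pvGetCell g r c).map (fun _ => v) else pvGetCell g r c := by
  intro l
  induction l with
  | nil => intro g; simp
  | cons x xs ih =>
    intro g
    rw [List.foldl_cons, ih, hstep]
    by_cases hx : T x = true <;> by_cases hxs : xs.any T = true <;>
      simp [hx, hxs] <;> cases pvGetCell g r c <;> simp

-- fold steps preserve the length of the grid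
theorem pv_foldl_len {α : Type} (f : List (List String) → α → List (List String))
    (h : ∀ g x, (f g x).length = g.length) :
    ∀ (l : List α) (g : List (List String)), (l.foldl f g).length = g.length := by
  intro l
  induction l with
  | nil => intro g; simp
  | cons x xs ih => intro g; rw [List.foldl_cons, ih, h]

theorem pv_len_A (n : Int) : (draw_snail n).length = (n * 5).toNat := by
  unfold draw_snail
  rw [pv_foldl_len]
  · simp
  · intro g k
    rw [pv_foldl_len]
    intro g i
    rw [pv_foldl_len]
    intro g j
    simp [pvSetCell, List.length_modify]

-- the predicate recording which cells loop iteration (k,i,j) blanks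
def pvHit (n k i j : Int) (r c : Nat) : Bool :=
  decide ((r = (k * n + i).toNat ∧ c = (n * 3 + j).toNat) ∨
          (r = ((k + 1) * n + i).toNat ∧ c = (n + j).toNat))

theorem pvGetCell_A (n : Int) (r c : Nat) :
    pvGetCell (draw_snail n) r c =
      if (PySem.List.pyRange 0 4 1).any (fun k =>
           (PySem.List.pyRange 0 n 1).any (fun i =>
             (PySem.List.pyRange 0 n 1).any (fun j => pvHit n k i j r c)))
      then (pvGetCell (List.replicate (n * 5).toNat (List.replicate (n * 5).toNat "@")) r c).map
             (fun _ => " ")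
      else pvGetCell (List.replicate (n * 5).toNat (List.replicate (n * 5).toNat "@")) r c := by
  unfold draw_snail
  rw [pv_foldl_update _ _ " " r c]
  intro g k
  rw [pv_foldl_update _ _ " " r c]
  intro g i
  rw [pv_foldl_update _ _ " " r c]
  intro g j
  rw [pvGetCell_setCell, pvGetCell_setCell]
  unfold pvHit
  by_cases h1 : r = (k * n + i).toNat ∧ c = (n * 3 + j).toNat <;>
    by_cases h2 : r = ((k + 1) * n + i).toNat ∧ c = (n + j).toNat <;>
      (try simp [h1, h2]) <;>
        (try (cases pvGetCell g (k * n + i).toNat (n * 3 + j).toNat <;> simp)) <;>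
        (try (cases pvGetCell g ((k + 1) * n + i).toNat (n + j).toNat <;> simp)) <;>
        (try (split_ifs <;> exact ⟨_, rfl⟩))

-- the double-rectangle membership, as B states it, matches A's triple loop hits
theorem pv_hit_iff (n : Int) (hn : 0 < n) (r c : Nat)
    (hr : (r : Int) < 5 * n) (hc : (c : Int) < 5 * n) :
    ((PySem.List.pyRange 0 4 1).any (fun k =>
       (PySem.List.pyRange 0 n 1).any (fun i =>
         (PySem.List.pyRange 0 n 1).any (fun j => pvHit n k i j r c))) = true) ↔
      ((3 * n ≤ (c : Int) ∧ (c : Int) < 4 * n ∧ (r : Int) < 4 * n) ∨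
       (n ≤ (c : Int) ∧ (c : Int) < 2 * n ∧ n ≤ (r : Int))) := by
  simp only [List.any_eq_true, PySem.List.mem_pyRange_one, pvHit, decide_eq_true_eq]
  constructor
  · rintro ⟨k, ⟨hk0, hk4⟩, i, ⟨hi0, hin⟩, j, ⟨hj0, hjn⟩, h | h⟩
    · have hkn0 : 0 ≤ k * n := mul_nonneg hk0 (le_of_lt hn)
      have hkn3 : k * n ≤ 3 * n := mul_le_mul_of_nonneg_right (by omega) (le_of_lt hn)
      left; omega
    · have hkn1 : 1 * n ≤ (k + 1) * n := mul_le_mul_of_nonneg_right (by omega) (le_of_lt hn)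
      have hkn4 : (k + 1) * n ≤ 4 * n := mul_le_mul_of_nonneg_right (by omega) (le_of_lt hn)
      right; omega
  · rintro (⟨h1, h2, h3⟩ | ⟨h1, h2, h3⟩)
    · have hd := Int.mul_ediv_add_emod (r : Int) n
      have hm0 := Int.emod_nonneg (r : Int) (by omega : n ≠ 0)
      have hmn := Int.emod_lt_of_pos (r : Int) hn
      have hq0 : 0 ≤ (r : Int) / n := Int.ediv_nonneg (by omega) (by omega)
      have hcm : (r : Int) / n * n = n * ((r : Int) / n) := mul_comm _ _
      have hq4 : (r : Int) / n < 4 := by nlinarith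
      have hq4' : n * ((r : Int) / n) ≤ 3 * n := by nlinarith
      refine ⟨(r : Int) / n, ⟨hq0, hq4⟩,
        (r : Int) % n, ⟨hm0, hmn⟩,
        (c : Int) - 3 * n, ⟨by omega, by omega⟩, Or.inl ⟨by omega, by omega⟩⟩
    · have hd := Int.mul_ediv_add_emod ((r : Int) - n) n
      have hm0 := Int.emod_nonneg ((r : Int) - n) (by omega : n ≠ 0)
      have hmn := Int.emod_lt_of_pos ((r : Int) - n) hn
      have hq0 : 0 ≤ ((r : Int) - n) / n := Int.ediv_nonneg (by omega) (by omega)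
      have hq4 : ((r : Int) - n) / n < 4 := by nlinarith
      have hcm : (((r : Int) - n) / n + 1) * n = n * (((r : Int) - n) / n) + n := by ring
      have hub : n * (((r : Int) - n) / n) ≤ 3 * n := by nlinarith
      refine ⟨((r : Int) - n) / n, ⟨hq0, hq4⟩,
        ((r : Int) - n) % n, ⟨hm0, hmn⟩,
        (c : Int) - n, ⟨by omega, by omega⟩, Or.inr ⟨by omega, by omega⟩⟩

theorem pvGetCell_B (n : Int) (hn : 0 < n) (r c : Nat) :
    pvGetCell (draw_snail_alt n) r c =
      if r < (5 * n).toNat ∧ c < (5 * n).toNat then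
        some (if (3 * n ≤ (c : Int) ∧ (c : Int) < 4 * n ∧ (r : Int) < 4 * n) ∨
                 (n ≤ (c : Int) ∧ (c : Int) < 2 * n ∧ n ≤ (r : Int)) then " " else "@")
      else none := by
  unfold draw_snail_alt pvGetCell
  rw [if_neg (by omega : ¬ n ≤ 0)]
  simp only [List.getElem?_map, PySem.List.getElem?_pyRange_one]
  have h50 : (5 * n - 0).toNat = (5 * n).toNat := by omega
  rw [h50]
  by_cases hr : r < (5 * n).toNat
  · rw [if_pos hr]
    simp only [Option.map_some, Option.bind_some]
    have hfd : PySem.Int.floordiv ((0 : Int) + (r : Nat)) n = (r : Int) / n := by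
      rw [PySem.Int.floordiv_eq_ediv_of_pos hn]; norm_num
    have hd := Int.mul_ediv_add_emod (r : Int) n
    have hm0 := Int.emod_nonneg (r : Int) (by omega : n ≠ 0)
    have hmn := Int.emod_lt_of_pos (r : Int) hn
    have hq0 : 0 ≤ (r : Int) / n := Int.ediv_nonneg (by omega) (by omega)
    have hr5i : (r : Int) < 5 * n := by omega
    have hq5 : (r : Int) / n < 5 := by nlinarith
    have hlen : ((PySem.List.pyRange 0 5 1).map (fun b =>
        (PySem.List.pyRange 0 (5 * n) 1).map (fun c =>
          if (3 * n ≤ c ∧ c < 4 * n ∧ b < 4) ∨ (n ≤ c ∧ c < 2 * n ∧ 1 ≤ b) then (" " : String)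
          else "@"))).length = 5 := by
      simp [PySem.List.length_pyRange_one]
    have hget := PySem.List.pyGetD_eq_getElem (xs := (PySem.List.pyRange 0 5 1).map (fun b =>
        (PySem.List.pyRange 0 (5 * n) 1).map (fun c =>
          if (3 * n ≤ c ∧ c < 4 * n ∧ b < 4) ∨ (n ≤ c ∧ c < 2 * n ∧ 1 ≤ b) then (" " : String)
          else "@"))) (d := []) (i := (r : Int) / n)
    rw [hfd, hget hq0 (by rw [hlen]; omega)]
    have hidx : ((r : Int) / n).toNat < (PySem.List.pyRange 0 5 1).length := by
      rw [PySem.List.length_pyRange_one]; omega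
    rw [List.getElem_map, PySem.List.getElem_pyRange_one]
    simp only [List.getElem?_map, PySem.List.getElem?_pyRange_one, h50]
    by_cases hc : c < (5 * n).toNat
    · rw [if_pos hc, if_pos (show r < (5 * n).toNat ∧ c < (5 * n).toNat from ⟨hr, hc⟩)]
      simp only [Option.map_some]
      have hqc : ((0 : Int) + ((((r : Int) / n).toNat : Int))) = (r : Int) / n := by omega
      rw [hqc]
      -- translate the band index back to a row bound
      have h4 : (r : Int) / n < 4 ↔ (r : Int) < 4 * n := by
        constructor <;> intro h <;> nlinarith
      have h1 : 1 ≤ (r : Int) / n ↔ n ≤ (r : Int) := by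
        constructor <;> intro h <;> nlinarith
      congr 1
      apply if_congr _ rfl rfl
      constructor <;> rintro (⟨hx, hy, hz⟩ | ⟨hx, hy, hz⟩) <;> [left; right; left; right] <;>
        refine ⟨by omega, by omega, by omega⟩
    · rw [if_neg hc, if_neg (by omega : ¬ (r < (5 * n).toNat ∧ c < (5 * n).toNat))]
      rfl
  · rw [if_neg hr, if_neg (by omega : ¬ (r < (5 * n).toNat ∧ c < (5 * n).toNat))]
    rfl

-- main pointwise agreement
theorem pv_cell_eq (n : Int) (r c : Nat) :
    pvGetCell (draw_snail n) r c = pvGetCell (draw_snail_alt n) r c := by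
  have hrep : pvGetCell (List.replicate (n * 5).toNat (List.replicate (n * 5).toNat "@")) r c =
      if r < (n * 5).toNat ∧ c < (n * 5).toNat then some "@" else none := by
    unfold pvGetCell
    by_cases hr : r < (n * 5).toNat <;> by_cases hc : c < (n * 5).toNat <;>
      simp [hr, hc]
  rcases le_or_gt n 0 with hn | hn
  · have hemp : PySem.List.pyRange 0 n 1 = [] := PySem.List.pyRange_one_eq_nil hn
    have halt : draw_snail_alt n = [] := by unfold draw_snail_alt; rw [if_pos hn]
    rw [pvGetCell_A, hrep, halt]
    simp [pvGetCell, hemp]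
    omega
  · rw [pvGetCell_A, pvGetCell_B n hn, hrep]
    by_cases hin : r < (5 * n).toNat ∧ c < (5 * n).toNat
    · have hr5 : (r : Int) < 5 * n := by omega
      have hc5 : (c : Int) < 5 * n := by omega
      by_cases hB : ((PySem.List.pyRange 0 4 1).any (fun k =>
          (PySem.List.pyRange 0 n 1).any (fun i =>
            (PySem.List.pyRange 0 n 1).any (fun j => pvHit n k i j r c)))) = true
      · have hp := (pv_hit_iff n hn r c hr5 hc5).mp hB
        rw [if_pos hB]
        split_ifs <;> first | rfl | (exfalso; omega)
      · have hp : ¬ ((3 * n ≤ (c : Int) ∧ (c : Int) < 4 * n ∧ (r : Int) < 4 * n) ∨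
            (n ≤ (c : Int) ∧ (c : Int) < 2 * n ∧ n ≤ (r : Int))) :=
          fun hq => hB ((pv_hit_iff n hn r c hr5 hc5).mpr hq)
        rw [if_neg hB]
        split_ifs <;> first | rfl | (exfalso; omega)
    · split_ifs <;> first | rfl | (exfalso; omega)

theorem pv_len_B (n : Int) : (draw_snail_alt n).length = (5 * n).toNat := by
  unfold draw_snail_alt
  by_cases hn : n ≤ 0
  · rw [if_pos hn]; simp; omega
  · rw [if_neg hn]; simp [PySem.List.length_pyRange_one]

-- ===== VERDICT (by name: the statement is the Claim_ definition above) =====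
theorem draw_snail_spec : Claim_equal_draw_snail := by
  intro n _
  unfold Spec_draw_snail
  apply List.ext_getElem?
  intro r
  rcases Nat.lt_or_ge r (5 * n).toNat with hr | hr
  · have hrA : r < (draw_snail n).length := by rw [pv_len_A]; omega
    have hrB : r < (draw_snail_alt n).length := by rw [pv_len_B]; omega
    have hA : (draw_snail n)[r]? = some ((draw_snail n)[r]) := List.getElem?_eq_getElem hrA
    have hB : (draw_snail_alt n)[r]? = some ((draw_snail_alt n)[r]) :=
      List.getElem?_eq_getElem hrB
    rw [hA, hB]
    have hrow : (draw_snail n)[r] = (draw_snail_alt n)[r] := by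
      apply List.ext_getElem?
      intro c
      have h := pv_cell_eq n r c
      unfold pvGetCell at h
      rw [hA, hB] at h
      simpa using h
    rw [hrow]
  · have hA : (draw_snail n)[r]? = none := by
      apply List.getElem?_eq_none; rw [pv_len_A]; omega
    have hB : (draw_snail_alt n)[r]? = none := by
      apply List.getElem?_eq_none; rw [pv_len_B]; omega
    rw [hA, hB]
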